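-- pv_equiv track=rewrite | github.com/luiseduardoalencar/chatbot-basicao-rag | utils/chatbot.py | ensure_token_limit
-- ===== SOURCE A (Python) =====
-- def ensure_token_limit(chunks, max_tokens=16000):
--     valid_chunks = []
--     total_tokens = 0
--     for chunk in chunks:
--         chunk_tokens = len(chunk)
--         if total_tokens + chunk_tokens < max_tokens:
--             valid_chunks.append(chunk)
--             total_tokens += chunk_tokens
--         else:
--             break
--     return valid_chunks
-- ===== SOURCE B (Python) =====
-- def ensure_token_limit(chunks, max_tokens=16000):
--     # Prefix sums of chunk lengths are non-decreasing (lengths >= 0), so the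
--     # kept prefix is chunks[:k] where k is the first index whose running total
--     # reaches max_tokens; find k by binary search instead of a sequential scan.
--     chunks = list(chunks)
--     prefix = []
--     total = 0
--     for c in chunks:
--         total += len(c)
--         prefix.append(total)
--     lo, hi = 0, len(chunks)
--     while lo < hi:
--         mid = (lo + hi) // 2
--         if prefix[mid] < max_tokens:
--             lo = mid + 1
--         else:
--             hi = mid
--     return chunks[:lo]
-- ===== Notes on version B (the rewrite author's own statement) =====
-- stated objective: alternative
-- what changed: Instead of a sequential accumulate-and-break scan, B builds the prefix-sum array of chunk lengths and binary-searches it (valid because prefix sums of non-negative lengths are monotone) for the first total reaching max_tokens, then returns the slice chunks[:k].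
import Mathlib
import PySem

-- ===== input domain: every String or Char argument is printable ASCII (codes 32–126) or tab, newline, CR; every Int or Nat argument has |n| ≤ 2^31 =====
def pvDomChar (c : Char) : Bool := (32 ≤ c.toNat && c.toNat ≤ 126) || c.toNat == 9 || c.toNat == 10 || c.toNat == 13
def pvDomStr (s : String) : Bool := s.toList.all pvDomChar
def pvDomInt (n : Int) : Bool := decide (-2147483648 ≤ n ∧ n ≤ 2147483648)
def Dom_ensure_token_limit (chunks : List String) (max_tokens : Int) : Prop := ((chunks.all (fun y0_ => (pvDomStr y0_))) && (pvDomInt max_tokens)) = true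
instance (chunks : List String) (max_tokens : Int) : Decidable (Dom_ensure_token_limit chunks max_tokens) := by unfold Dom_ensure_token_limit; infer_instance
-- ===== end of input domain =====

-- B replaces A's sequential accumulate-and-break scan by a prefix-sum array plus a binary
-- search for the cutoff index (valid since prefix sums of lengths are monotone); objective: alternative.

-- ===== PORT A =====
-- A's for-loop with break, as structural recursion carrying total_tokens.
def ensureLoopA (max_tokens : Int) : List String → Int → List String
  | [], _ => []
  | chunk :: rest, total =>
      let chunk_tokens := PySem.Str.len chunk
      if total + chunk_tokens < max_tokens then
        chunk :: ensureLoopA max_tokens rest (total + chunk_tokens)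
      else
        []

def ensure_token_limit (chunks : List String) (max_tokens : Int) : List String :=
  ensureLoopA max_tokens chunks 0

-- ===== PORT B =====
-- Source B's first pass: the prefix-sum list of chunk lengths, carrying the running total.
def prefixSumsB : List String → Int → List Int
  | [], _ => []
  | c :: rest, total => (total + PySem.Str.len c) :: prefixSumsB rest (total + PySem.Str.len c)

-- Source B's while-loop binary search. lo, hi are non-negative Python ints (Nat here); the loop
-- keeps 0 ≤ lo ≤ hi ≤ len(prefix), so `(lo+hi)//2` is Nat division and `prefix[mid]` is always
-- in range (the getD default is never consulted).
def bsearchB (pre : List Int) (max_tokens : Int) (lo hi : Nat) : Nat :=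
  if _h : lo < hi then
    if pre.getD ((lo + hi) / 2) 0 < max_tokens then
      bsearchB pre max_tokens ((lo + hi) / 2 + 1) hi
    else
      bsearchB pre max_tokens lo ((lo + hi) / 2)
  else lo
  termination_by hi - lo
  decreasing_by all_goals omega

def ensure_token_limit_alt (chunks : List String) (max_tokens : Int) : List String :=
  chunks.take (bsearchB (prefixSumsB chunks 0) max_tokens 0 chunks.length)

-- ===== PRECONDITION & SPEC =====
def Spec_ensure_token_limit (chunks : List String) (max_tokens : Int) (out : List String) : Prop := out = ensure_token_limit_alt chunks max_tokens
instance (chunks : List String) (max_tokens : Int) (out : List String) : Decidable (Spec_ensure_token_limit chunks max_tokens out) := by unfold Spec_ensure_token_limit; infer_instance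

-- ===== CLAIM (what is proved, stated in full; the proofs are below) =====
def Claim_equal_ensure_token_limit : Prop := ∀ (chunks : List String) (max_tokens : Int), Dom_ensure_token_limit chunks max_tokens → Spec_ensure_token_limit chunks max_tokens (ensure_token_limit chunks max_tokens)

-- ===== LEMMAS AND PROOFS =====

-- A's loop returns the prefix of chunks of length k, where k is how many leading
-- prefix sums stay below max_tokens.
theorem loopA_eq_take (max_tokens : Int) :
    ∀ (chunks : List String) (total : Int),
      ensureLoopA max_tokens chunks total
        = chunks.take ((prefixSumsB chunks total).takeWhile (fun t => decide (t < max_tokens))).length := by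
  intro chunks
  induction chunks with
  | nil => intro total; simp [ensureLoopA, prefixSumsB]
  | cons c rest ih =>
      intro total
      simp only [ensureLoopA, prefixSumsB, List.takeWhile_cons, PySem.Str.len_eq]
      by_cases h : total + (c.length : Int) < max_tokens
      · simp [h, ih]
      · simp [h]

theorem prefixSumsB_length : ∀ (chunks : List String) (total : Int),
    (prefixSumsB chunks total).length = chunks.length := by
  intro chunks
  induction chunks with
  | nil => intro total; simp [prefixSumsB]
  | cons c rest ih => intro total; simp [prefixSumsB, ih]

theorem prefixSumsB_lb : ∀ (chunks : List String) (total : Int) (x : Int),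
    x ∈ prefixSumsB chunks total → total ≤ x := by
  intro chunks
  induction chunks with
  | nil => intro total x hx; simp [prefixSumsB] at hx
  | cons c rest ih =>
      intro total x hx
      have hlen : (0 : Int) ≤ PySem.Str.len c := by
        simp [PySem.Str.len_eq]
      simp only [prefixSumsB, List.mem_cons] at hx
      rcases hx with h | h
      · omega
      · have := ih (total + PySem.Str.len c) x h
        omega

-- monotonicity of the prefix sums
theorem prefixSumsB_mono : ∀ (chunks : List String) (total : Int) (i j : Nat),
    i ≤ j → j < (prefixSumsB chunks total).length →
    (prefixSumsB chunks total).getD i 0 ≤ (prefixSumsB chunks total).getD j 0 := by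
  intro chunks
  induction chunks with
  | nil => intro total i j _ hj; simp [prefixSumsB] at hj
  | cons c rest ih =>
      intro total i j hij hj
      simp only [prefixSumsB, List.length_cons] at hj ⊢
      match i, j with
      | 0, 0 => simp
      | 0, j + 1 =>
          simp only [List.getD_cons_zero, List.getD_cons_succ]
          have hjlen : j < (prefixSumsB rest (total + PySem.Str.len c)).length := by omega
          have hmem : (prefixSumsB rest (total + PySem.Str.len c)).getD j 0
              ∈ prefixSumsB rest (total + PySem.Str.len c) := by
            rw [List.getD_eq_getElem _ _ hjlen]; exact List.getElem_mem _
          exact prefixSumsB_lb rest (total + PySem.Str.len c) _ hmem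
      | i + 1, j + 1 =>
          simp only [List.getD_cons_succ]
          exact ih (total + PySem.Str.len c) i j (by omega) (by omega)

-- elements strictly inside the takeWhile prefix satisfy the predicate
theorem takeWhile_all (m : Int) : ∀ (l : List Int) (i : Nat),
    i < (l.takeWhile (fun t => decide (t < m))).length → l.getD i 0 < m := by
  intro l
  induction l with
  | nil => intro i hi; simp at hi
  | cons c rest ih =>
      intro i hi
      rw [List.takeWhile_cons] at hi
      by_cases hc : c < m
      · simp only [hc, decide_true, if_true, List.length_cons] at hi
        match i with
        | 0 => simpa using hc
        | i + 1 =>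
            simp only [List.getD_cons_succ]
            exact ih i (by omega)
      · simp [hc] at hi
  
-- the element just past the takeWhile prefix (if any) fails the predicate
theorem takeWhile_stop (m : Int) : ∀ (l : List Int),
    (l.takeWhile (fun t => decide (t < m))).length < l.length →
    ¬ l.getD ((l.takeWhile (fun t => decide (t < m))).length) 0 < m := by
  intro l
  induction l with
  | nil => intro h; simp at h
  | cons c rest ih =>
      intro h
      rw [List.takeWhile_cons]
      by_cases hc : c < m
      · simp only [hc, decide_true, if_true, List.length_cons, List.getD_cons_succ]
        rw [List.takeWhile_cons] at h
        simp only [hc, decide_true, if_true, List.length_cons, List.length_cons] at h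
        exact ih (by omega)
      · simp [hc]

-- binary-search correctness: if k splits pr into "< m" below and "not < m" above,
-- the loop invariant lo ≤ k ≤ hi forces the answer k.
theorem bsearchB_eq (pr : List Int) (m : Int) (k : Nat)
    (h1 : ∀ i, i < k → pr.getD i 0 < m)
    (h2 : ∀ i, k ≤ i → i < pr.length → ¬ pr.getD i 0 < m) :
    ∀ (n lo hi : Nat), hi - lo ≤ n → lo ≤ k → k ≤ hi → hi ≤ pr.length →
      bsearchB pr m lo hi = k := by
  intro n
  induction n with
  | zero =>
      intro lo hi hn hlo hhi hlen
      rw [bsearchB]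
      rw [dif_neg (by omega)]
      omega
  | succ n ih =>
      intro lo hi hn hlo hhi hlen
      rw [bsearchB]
      by_cases hlh : lo < hi
      · rw [dif_pos hlh]
        by_cases hm : pr.getD ((lo + hi) / 2) 0 < m
        · rw [if_pos hm]
          have hmidk : (lo + hi) / 2 < k := by
            by_contra hcon
            exact h2 ((lo + hi) / 2) (by omega) (by omega) hm
          exact ih ((lo + hi) / 2 + 1) hi (by omega) (by omega) (by omega) hlen
        · rw [if_neg hm]
          have hkmid : k ≤ (lo + hi) / 2 := by
            by_contra hcon
            exact hm (h1 ((lo + hi) / 2) (by omega))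
          exact ih lo ((lo + hi) / 2) (by omega) hlo hkmid (by omega)
      · rw [dif_neg hlh]
        omega

-- ===== VERDICT (by name: the statement is the Claim_ definition above) =====
theorem ensure_token_limit_spec : Claim_equal_ensure_token_limit := by
  intro chunks max_tokens _
  unfold Spec_ensure_token_limit ensure_token_limit ensure_token_limit_alt
  set pr := prefixSumsB chunks 0 with hpr
  set k := (pr.takeWhile (fun t => decide (t < max_tokens))).length with hk
  have hprlen : pr.length = chunks.length := prefixSumsB_length chunks 0
  have hkle : k ≤ pr.length := by
    rw [hk]; exact (List.takeWhile_sublist _).length_le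
  have h2 : ∀ i, k ≤ i → i < pr.length → ¬ pr.getD i 0 < max_tokens := by
    intro i hki hil
    rcases Nat.eq_or_lt_of_le hki with heq | hlt
    · rw [← heq]
      exact takeWhile_stop max_tokens pr (by omega)
    · have hstop : ¬ pr.getD k 0 < max_tokens :=
        takeWhile_stop max_tokens pr (by omega)
      have hmono : pr.getD k 0 ≤ pr.getD i 0 :=
        prefixSumsB_mono chunks 0 k i (by omega) hil
      omega
  have hb : bsearchB pr max_tokens 0 chunks.length = k := by
    exact bsearchB_eq pr max_tokens k (takeWhile_all max_tokens pr) h2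
      chunks.length 0 chunks.length (by omega) (by omega) (by omega) (by omega)
  rw [loopA_eq_take max_tokens chunks 0, hb]
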